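-- pv_equiv track=rewrite | github.com/StepanShitov/CodeWars-tasks | CodeWarsTasks.py | find_pairs2
-- ===== SOURCE A (Python) =====
-- def find_pairs2(a):
--     while True:
--         pairs_flag = False
--         for i in range(len(a)):
--             next_element = a[(i + 1) % len(a)]
--             previous_element = a[(i - 1 + len(a)) % len(a)]
--             if a[i] > next_element or a[i] > previous_element:
--                 pairs_flag = True
--                 while a[i] > next_element:
--                     a[i] -= next_element
--                 while a[i] > previous_element:
--                     a[i] -= previous_element
--         if pairs_flag == False: break;
--     return(a)
-- ===== SOURCE B (Python) =====
-- def _gcd(x, y):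
--     while y:
--         x, y = y, x % y
--     return x
--
-- def find_pairs2(a):
--     if all(x == a[0] for x in a[1:]):
--         return a
--     g = 0
--     for x in a:
--         g = _gcd(g, x)
--     a[:] = [g] * len(a)
--     return a
-- ===== Notes on version B (the rewrite author's own statement) =====
-- stated objective: alternative
-- what changed: A simulates the repeated-subtraction passes until the list stabilises (pseudo-polynomial in the element values); B uses the closed form: the process converges to the list in which every element is the gcd of all elements, so B computes that gcd by Euclid in one pass and fills the list (constant/empty lists returned unchanged). Intended as faster (a timing run saw A time out at n=16 where B returned, but could not measure a clean ratio). Pre_ admits exactly the lists on which A returns (all elements positive, or a constant list); everywhere else A's inner subtraction loop diverges.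
import Mathlib
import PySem

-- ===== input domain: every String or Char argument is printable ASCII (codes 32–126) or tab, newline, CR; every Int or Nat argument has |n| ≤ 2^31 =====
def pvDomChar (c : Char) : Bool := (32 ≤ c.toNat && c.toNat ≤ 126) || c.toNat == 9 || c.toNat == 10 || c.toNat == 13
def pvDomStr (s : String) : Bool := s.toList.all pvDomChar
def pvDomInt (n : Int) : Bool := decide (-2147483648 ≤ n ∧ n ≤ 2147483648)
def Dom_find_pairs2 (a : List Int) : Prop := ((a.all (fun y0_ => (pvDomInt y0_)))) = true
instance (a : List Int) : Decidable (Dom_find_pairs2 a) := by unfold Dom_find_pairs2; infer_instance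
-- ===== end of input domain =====

-- B replaces A's whole stabilisation loop by its closed form: on the admitted inputs the
-- repeated-subtraction process converges to the list filled with the gcd of all elements,
-- so B computes that gcd by Euclid in one pass (intended as faster — a timing run saw A
-- time out where B returned but could not measure a clean ratio). Both Pythons mutate the
-- argument list in place before returning it; the theorems here are about the returned value.

-- ===== PORT A =====
-- 'while a[i] > d: a[i] -= d' as structural recursion on a fuel bound; under Pre_ the
-- subtrahend d is ≥ 1 so (x - d).toNat iterations are always enough fuel.
def pvSubFuel : Nat → Int → Int → Int
  | 0, x, _ => x
  | f+1, x, d => if d < x then pvSubFuel f (x - d) d else x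

-- one body of A's 'for i in range(len(a))'; list indices are Nat and always in range
-- (range(len(a)) and % len(a)), so List.getD/List.set are exact for Python a[k] / a[k]=v here.
def pvStepA (s : List Int × Bool) (i : Nat) : List Int × Bool :=
  let a := s.1
  let n := a.length
  let nxt := a.getD ((i + 1) % n) 0
  let prv := a.getD ((i + n - 1) % n) 0
  let x := a.getD i 0
  if nxt < x ∨ prv < x then
    let x1 := pvSubFuel (x - nxt).toNat x nxt
    let x2 := pvSubFuel (x1 - prv).toNat x1 prv
    (a.set i x2, true)
  else s

def pvPassA (a : List Int) : List Int × Bool :=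
  (List.range a.length).foldl pvStepA (a, false)

-- A's 'while True: … if not pairs_flag: break' with fuel; under Pre_ every flagged pass
-- strictly decreases the sum of the (positive) values, so sum+1 passes always suffice.
def pvLoopA : Nat → List Int → List Int
  | 0, a => a
  | f+1, a =>
    let r := pvPassA a
    if r.2 then pvLoopA f r.1 else r.1

def find_pairs2 (a : List Int) : List Int :=
  pvLoopA ((a.map Int.toNat).sum + 1) a

-- ===== PORT B =====
-- B's helper _gcd: Euclid's algorithm with Python's floor mod, recursion on |y|.
def pvGcd (x y : Int) : Int :=
  if h : y = 0 then x
  else pvGcd y (PySem.Int.mod x y)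
termination_by y.natAbs
decreasing_by
  rcases lt_trichotomy y 0 with hy | hy | hy
  · have h1 := PySem.Int.mod_neg_bounds x hy
    omega
  · exact absurd hy h
  · have h1 := PySem.Int.mod_nonneg x hy
    have h2 := PySem.Int.mod_lt x hy
    omega

-- B: constant (or empty) lists are returned unchanged; otherwise fold _gcd over the list
-- starting from 0 and fill the list with the result ('a[:] = [g] * len(a)').
def find_pairs2_alt (a : List Int) : List Int :=
  if (a.drop 1).all (fun x => x == a.headI) then a
  else List.replicate a.length (a.foldl pvGcd 0)

-- ===== PRECONDITION & SPEC =====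
-- On every other input (length ≥ 2, some element ≤ 0, not all equal) A's inner
-- 'while a[i] > d: a[i] -= d' eventually runs with a subtrahend d ≤ 0 and never
-- terminates, so those inputs are excluded: Pre_ admits all-positive lists and
-- constant lists (which are already stable), exactly where A returns.
def Pre_find_pairs2 (a : List Int) : Prop :=
  (∀ x ∈ a, 0 < x) ∨ (∀ x ∈ a, x = a.headI)
instance (a : List Int) : Decidable (Pre_find_pairs2 a) := by unfold Pre_find_pairs2; infer_instance

def pvWitness_find_pairs2 : List Int := [6, 4, 10]

def Spec_find_pairs2 (a : List Int) (out : List Int) : Prop := out = find_pairs2_alt a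
instance (a : List Int) (out : List Int) : Decidable (Spec_find_pairs2 a out) := by unfold Spec_find_pairs2; infer_instance

-- ===== CLAIM (what is proved, stated in full; the proofs are below) =====
def Claim_equal_find_pairs2 : Prop := ∀ (a : List Int), Dom_find_pairs2 a → Pre_find_pairs2 a → Spec_find_pairs2 a (find_pairs2 a)

-- ===== LEMMAS AND PROOFS =====

-- d is a common divisor of the elements of a
def pvCD (a : List Int) (d : Int) : Prop := ∀ x ∈ a, d ∣ x
-- the termination measure of A's outer loop
def pvS (a : List Int) : Nat := (a.map Int.toNat).sum

-- the repeated-subtraction loop subtracts some multiple of d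
lemma pvSubFuel_sub : ∀ (f : Nat) (x d : Int), ∃ k : Nat, pvSubFuel f x d = x - k * d := by
  intro f
  induction f with
  | zero => intro x d; exact ⟨0, by simp [pvSubFuel]⟩
  | succ f ih =>
    intro x d
    simp only [pvSubFuel]
    by_cases h : d < x
    · obtain ⟨k, hk⟩ := ih (x - d) d
      exact ⟨k + 1, by rw [if_pos h, hk]; push_cast; ring⟩
    · exact ⟨0, by rw [if_neg h]; simp⟩

-- closed form of the loop once the subtrahend is positive and fuel suffices
lemma pvSubFuel_eq : ∀ (f : Nat) (x d : Int), 1 ≤ d → (x - d).toNat ≤ f →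
    pvSubFuel f x d = if d < x then PySem.Int.mod (x - 1) d + 1 else x := by
  intro f
  induction f with
  | zero =>
    intro x d hd hf
    simp only [pvSubFuel]
    rw [if_neg (by omega)]
  | succ f ih =>
    intro x d hd hf
    simp only [pvSubFuel]
    by_cases h : d < x
    · rw [if_pos h, if_pos h, ih (x - d) d hd (by omega),
        PySem.Int.mod_eq_emod_of_pos (by omega)]
      by_cases h2 : d < x - d
      · rw [if_pos h2, PySem.Int.mod_eq_emod_of_pos (by omega)]
        have : x - d - 1 = (x - 1) - d := by ring
        rw [this, Int.sub_emod_right]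
      · rw [if_neg h2, PySem.Int.mod_eq_emod_of_pos (by omega),
          ← Int.sub_emod_right (x - 1) d, Int.emod_eq_of_lt (by omega) (by omega)]
        omega
    · rw [if_neg h, if_neg h]

lemma pvGetD_mem_of_lt (a : List Int) (j : Nat) (hj : j < a.length) : a.getD j 0 ∈ a := by
  rw [List.getD_eq_getElem a 0 hj]
  exact a.getElem_mem hj

lemma pvSum_set : ∀ (a : List Int) (i : Nat) (v : Int), i < a.length →
    pvS (a.set i v) + (a.getD i 0).toNat = pvS a + v.toNat := by
  intro a
  induction a with
  | nil => intro i v h; simp at h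
  | cons x t ih =>
    intro i v h
    cases i with
    | zero => simp [pvS]; omega
    | succ i =>
      have := ih i v (by simpa using h)
      simp only [pvS, List.set, List.map_cons, List.sum_cons, List.getD_cons_succ] at this ⊢
      omega

-- one step of A's pass: length, positivity and the common divisors are preserved, the
-- sum never grows, and the step is either a no-op or flags and strictly decreases the sum.
lemma pvStepA_spec (a : List Int) (fl : Bool) (i : Nat) (hi : i < a.length)
    (hpos : ∀ x ∈ a, 0 < x) :
    (pvStepA (a, fl) i).1.length = a.length ∧
    (∀ x ∈ (pvStepA (a, fl) i).1, 0 < x) ∧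
    (∀ d, pvCD a d ↔ pvCD (pvStepA (a, fl) i).1 d) ∧
    (pvStepA (a, fl) i = (a, fl) ∨
      ((pvStepA (a, fl) i).2 = true ∧ pvS (pvStepA (a, fl) i).1 < pvS a)) := by
  have hn : 0 < a.length := Nat.lt_of_le_of_lt (Nat.zero_le _) hi
  have hnx : (i + 1) % a.length < a.length := Nat.mod_lt _ hn
  have hpv : (i + a.length - 1) % a.length < a.length := Nat.mod_lt _ hn
  simp only [pvStepA]
  set n := a.length with hnn
  set nxt := a.getD ((i + 1) % n) 0 with hnxt
  set prv := a.getD ((i + n - 1) % n) 0 with hprv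
  set x := a.getD i 0 with hx
  by_cases hc : nxt < x ∨ prv < x
  · rw [if_pos hc]
    have hxpos : 0 < x := hpos _ (pvGetD_mem_of_lt a i hi)
    have hnxp : 0 < nxt := hpos _ (pvGetD_mem_of_lt a _ hnx)
    have hpvp : 0 < prv := hpos _ (pvGetD_mem_of_lt a _ hpv)
    -- n = 1 would make both neighbours x itself, contradicting hc
    have hn2 : 2 ≤ n := by
      by_contra h2
      have hn1 : n = 1 := by omega
      have hi0 : i = 0 := by omega
      have e1 : (i + 1) % n = i := by rw [hn1, hi0]
      have e2 : (i + n - 1) % n = i := by rw [hn1, hi0]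
      rw [hnxt, e1] at hc
      rw [hprv, e2] at hc
      rw [hx] at hc
      omega
    -- the neighbour indices differ from i
    have hj1 : (i + 1) % n ≠ i := by
      rcases Nat.lt_or_ge (i + 1) n with h | h
      · rw [Nat.mod_eq_of_lt h]; omega
      · have : i + 1 = n := by omega
        rw [this, Nat.mod_self]; omega
    have hj2 : (i + n - 1) % n ≠ i := by
      rcases Nat.eq_zero_or_pos i with h0 | h0
      · subst h0
        rw [Nat.zero_add, Nat.mod_eq_of_lt (by omega)]; omega
      · have e : i + n - 1 = (i - 1) + n := by omega
        rw [e, Nat.add_mod_right, Nat.mod_eq_of_lt (by omega)]; omega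
    set x1 := pvSubFuel (x - nxt).toNat x nxt with hx1
    set x2 := pvSubFuel (x1 - prv).toNat x1 prv with hx2
    -- closed-form bounds for both inner loops
    have e1 : x1 = if nxt < x then PySem.Int.mod (x - 1) nxt + 1 else x :=
      pvSubFuel_eq _ x nxt (by omega) (le_refl _)
    have hb1 : (nxt < x → 1 ≤ x1 ∧ x1 ≤ nxt) ∧ (¬ nxt < x → x1 = x) := by
      constructor
      · intro h
        have hmn := PySem.Int.mod_nonneg (x - 1) hnxp
        have hmn' := PySem.Int.mod_lt (x - 1) hnxp
        rw [e1, if_pos h]; omega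
      · intro h; rw [e1, if_neg h]
    have hx1pos : 0 < x1 := by
      by_cases h : nxt < x
      · have := hb1.1 h; omega
      · have := hb1.2 h; omega
    have e2 : x2 = if prv < x1 then PySem.Int.mod (x1 - 1) prv + 1 else x1 :=
      pvSubFuel_eq _ x1 prv (by omega) (le_refl _)
    have hb2 : (prv < x1 → 1 ≤ x2 ∧ x2 ≤ prv) ∧ (¬ prv < x1 → x2 = x1) := by
      constructor
      · intro h
        have hmp := PySem.Int.mod_nonneg (x1 - 1) hpvp
        have hmp' := PySem.Int.mod_lt (x1 - 1) hpvp
        rw [e2, if_pos h]; omega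
      · intro h; rw [e2, if_neg h]
    have hx2pos : 0 < x2 := by
      by_cases h : prv < x1
      · have := hb2.1 h; omega
      · have := hb2.2 h; omega
    have hx2lt : x2 < x := by
      rcases hc with h | h
      · have h1 := hb1.1 h
        by_cases h2 : prv < x1
        · have := hb2.1 h2; omega
        · have := hb2.2 h2; omega
      · by_cases h1 : nxt < x
        · have := hb1.1 h1
          by_cases h2 : prv < x1
          · have := hb2.1 h2; omega
          · have := hb2.2 h2; omega
        · have hx1e := hb1.2 h1
          have h2 : prv < x1 := by omega
          have := hb2.1 h2; omega
    -- x2 = x minus multiples of the two neighbours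
    obtain ⟨k1, hk1⟩ := pvSubFuel_sub (x - nxt).toNat x nxt
    obtain ⟨k2, hk2⟩ := pvSubFuel_sub (x1 - prv).toNat x1 prv
    have hx2eq : x2 = x - k1 * nxt - k2 * prv := by
      rw [hx2, hk2, hx1, hk1]
    -- elements of the updated list at the neighbour indices are unchanged
    have hget_ne : ∀ j, j < n → j ≠ i → (a.set i x2).getD j 0 = a.getD j 0 := by
      intro j hj hne
      rw [List.getD_eq_getElem _ 0 (by simpa using hj), List.getD_eq_getElem a 0 hj,
        List.getElem_set]
      rw [if_neg (by omega)]
    refine ⟨by simp [← hnn], ?_, ?_, Or.inr ⟨rfl, ?_⟩⟩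
    · intro y hy
      rcases List.mem_or_eq_of_mem_set hy with h | h
      · exact hpos _ h
      · omega
    · intro d
      constructor
      · intro hd y hy
        rcases List.mem_or_eq_of_mem_set hy with h | h
        · exact hd _ h
        · subst h
          rw [hx2eq]
          have d1 : d ∣ x := hd _ (pvGetD_mem_of_lt a i (by omega))
          have d2 : d ∣ nxt := hd _ (pvGetD_mem_of_lt a _ (by omega))
          have d3 : d ∣ prv := hd _ (pvGetD_mem_of_lt a _ (by omega))
          exact dvd_sub (dvd_sub d1 (Dvd.dvd.mul_left d2 _)) (Dvd.dvd.mul_left d3 _)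
      · intro hd
        have d2 : d ∣ nxt := by
          have := hd _ (pvGetD_mem_of_lt (a.set i x2) ((i + 1) % n)
            (by rw [List.length_set]; omega))
          rwa [hget_ne _ (by omega) hj1] at this
        have d3 : d ∣ prv := by
          have := hd _ (pvGetD_mem_of_lt (a.set i x2) ((i + n - 1) % n)
            (by rw [List.length_set]; omega))
          rwa [hget_ne _ (by omega) hj2] at this
        have dx2 : d ∣ x2 := by
          have hmem : x2 ∈ a.set i x2 := by
            rw [List.mem_iff_getElem]
            exact ⟨i, by rw [List.length_set]; omega, by rw [List.getElem_set, if_pos rfl]⟩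
          exact hd _ hmem
        have dx : d ∣ x := by
          have : x = x2 + k1 * nxt + k2 * prv := by rw [hx2eq]; ring
          rw [this]
          exact dvd_add (dvd_add dx2 (Dvd.dvd.mul_left d2 _)) (Dvd.dvd.mul_left d3 _)
        intro y hy2
        obtain ⟨j, hj, rfl⟩ := List.mem_iff_getElem.mp hy2
        by_cases hji : j = i
        · have hgd : a[j] = a.getD j 0 := (List.getD_eq_getElem a 0 hj).symm
          rw [hgd, hji]
          exact dx
        · have : a[j] = (a.set i x2)[j]'(by rw [List.length_set]; omega) := by
            rw [List.getElem_set]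
            rw [if_neg (by omega)]
          rw [this]
          exact hd _ (List.getElem_mem _)
    · have hs := pvSum_set a i x2 (by omega)
      have hlt : x2.toNat < x.toNat := by omega
      show pvS (a.set i x2) < pvS a
      omega
  · rw [if_neg hc]
    exact ⟨rfl, hpos, fun d => Iff.rfl, Or.inl rfl⟩

-- the flag is monotone through a pass
lemma pvFoldA_flag : ∀ (is : List Nat) (s : List Int × Bool), s.2 = true →
    (is.foldl pvStepA s).2 = true := by
  intro is
  induction is with
  | nil => intro s h; exact h
  | cons i is ih =>
    intro s h
    apply ih
    simp only [pvStepA]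
    by_cases hc : s.1.getD ((i + 1) % s.1.length) 0 < s.1.getD i 0 ∨
        s.1.getD ((i + s.1.length - 1) % s.1.length) 0 < s.1.getD i 0
    · rw [if_pos hc]
    · rw [if_neg hc]; exact h

-- a whole pass: the aggregated form of pvStepA_spec over any in-range index list
lemma pvFoldA_spec : ∀ (is : List Nat) (a : List Int) (fl : Bool),
    (∀ i ∈ is, i < a.length) → (∀ x ∈ a, 0 < x) →
    (is.foldl pvStepA (a, fl)).1.length = a.length ∧
    (∀ x ∈ (is.foldl pvStepA (a, fl)).1, 0 < x) ∧
    (∀ d, pvCD a d ↔ pvCD (is.foldl pvStepA (a, fl)).1 d) ∧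
    (is.foldl pvStepA (a, fl) = (a, fl) ∨
      ((is.foldl pvStepA (a, fl)).2 = true ∧ pvS (is.foldl pvStepA (a, fl)).1 < pvS a)) := by
  intro is
  induction is with
  | nil => intro a fl _ hpos; exact ⟨rfl, hpos, fun d => Iff.rfl, Or.inl rfl⟩
  | cons i is ih =>
    intro a fl hmem hpos
    have hi : i < a.length := hmem i (by simp)
    obtain ⟨hl, hp, hcd, hdisj⟩ := pvStepA_spec a fl i hi hpos
    simp only [List.foldl_cons]
    rcases hdisj with heq | ⟨hfl, hdec⟩
    · rw [heq]
      exact ih a fl (fun j hj => hmem j (by simp [hj])) hpos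
    · obtain ⟨l2, p2, cd2, disj2⟩ := ih (pvStepA (a, fl) i).1 (pvStepA (a, fl) i).2
        (fun j hj => by rw [hl]; exact hmem j (by simp [hj])) hp
      have hsplit : is.foldl pvStepA (pvStepA (a, fl) i) =
          is.foldl pvStepA ((pvStepA (a, fl) i).1, (pvStepA (a, fl) i).2) := rfl
      rw [hsplit]
      refine ⟨by rw [l2, hl], p2, fun d => (hcd d).trans (cd2 d), Or.inr ⟨?_, ?_⟩⟩
      · rcases disj2 with h | h
        · rw [h]; exact hfl
        · exact h.1
      · rcases disj2 with h | h
        · rw [h]; exact hdec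
        · exact Nat.lt_trans h.2 hdec
    
-- a pass from flag 'false' that ends with flag 'false' visited only stable positions
lemma pvFoldA_false : ∀ (is : List Nat) (a : List Int),
    (is.foldl pvStepA (a, false)).2 = false →
    ∀ i ∈ is, ¬(a.getD ((i + 1) % a.length) 0 < a.getD i 0 ∨
        a.getD ((i + a.length - 1) % a.length) 0 < a.getD i 0) := by
  intro is
  induction is with
  | nil => intro a _ i hi; simp at hi
  | cons j is ih =>
    intro a hflag i hi
    by_cases hc : a.getD ((j + 1) % a.length) 0 < a.getD j 0 ∨
        a.getD ((j + a.length - 1) % a.length) 0 < a.getD j 0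
    · exfalso
      have hstep : (pvStepA (a, false) j).2 = true := by
        simp only [pvStepA]
        rw [if_pos hc]
      have : (is.foldl pvStepA (pvStepA (a, false) j)).2 = true := by
        apply pvFoldA_flag
        exact hstep
      simp only [List.foldl_cons] at hflag
      rw [hflag] at this
      exact Bool.false_ne_true this
    · have hstep : pvStepA (a, false) j = (a, false) := by
        simp only [pvStepA]
        rw [if_neg hc]
      simp only [List.foldl_cons, hstep] at hflag
      rcases List.mem_cons.mp hi with rfl | hmem
      · exact hc
      · exact ih a hflag i hmem

-- a cyclically non-decreasing list is constant
lemma pvConst_of_le (a : List Int)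
    (h : ∀ i < a.length, a.getD i 0 ≤ a.getD ((i + 1) % a.length) 0) :
    ∀ x ∈ a, x = a.headI := by
  intro x hx
  obtain ⟨j, hj, rfl⟩ := List.mem_iff_getElem.mp hx
  have chain : ∀ k : Nat, ∀ i : Nat, i + k < a.length → a.getD i 0 ≤ a.getD (i + k) 0 := by
    intro k
    induction k with
    | zero => intro i _; simp
    | succ k ih =>
      intro i hik
      have h1 : a.getD i 0 ≤ a.getD (i + k) 0 := ih i (by omega)
      have h2 := h (i + k) (by omega)
      rw [Nat.mod_eq_of_lt (by omega : i + k + 1 < a.length)] at h2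
      calc a.getD i 0 ≤ a.getD (i + k) 0 := h1
        _ ≤ a.getD (i + k + 1) 0 := h2
  have wrap : a.getD (a.length - 1) 0 ≤ a.getD 0 0 := by
    have h2 := h (a.length - 1) (by omega)
    rw [(by omega : a.length - 1 + 1 = a.length), Nat.mod_self] at h2
    exact h2
  have lo : a.getD 0 0 ≤ a.getD j 0 := by simpa using chain j 0 (by omega)
  have hi2 : a.getD j 0 ≤ a.getD (a.length - 1) 0 := by
    have := chain (a.length - 1 - j) j (by omega)
    rw [(by omega : j + (a.length - 1 - j) = a.length - 1)] at this
    exact this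
  have heq0 : a.getD j 0 = a.getD 0 0 := by omega
  rw [← List.getD_eq_getElem a 0 hj, heq0]
  cases a with
  | nil => simp at hj
  | cons b t => rfl

-- A's outer loop on a positive list: the result is a constant positive list with the
-- same common divisors, provided the fuel exceeds the sum measure
lemma pvLoopA_spec : ∀ (f : Nat) (a : List Int), (∀ x ∈ a, 0 < x) → pvS a < f →
    (pvLoopA f a).length = a.length ∧
    (∀ x ∈ pvLoopA f a, 0 < x) ∧
    (∀ d, pvCD a d ↔ pvCD (pvLoopA f a) d) ∧
    (∀ x ∈ pvLoopA f a, x = (pvLoopA f a).headI) := by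
  intro f
  induction f with
  | zero => intro a _ h; exact absurd h (Nat.not_lt_zero _)
  | succ f ih =>
    intro a hpos hf
    obtain ⟨hl, hp, hcd, hdisj⟩ := pvFoldA_spec (List.range a.length) a false
      (fun i hi => List.mem_range.mp hi) hpos
    simp only [pvLoopA, pvPassA]
    by_cases hfl : ((List.range a.length).foldl pvStepA (a, false)).2 = true
    · rw [if_pos hfl]
      have hdec : pvS ((List.range a.length).foldl pvStepA (a, false)).1 < pvS a := by
        rcases hdisj with heq | h2
        · rw [heq] at hfl; exact absurd hfl (by simp)
        · exact h2.2
      obtain ⟨l2, p2, cd2, cst2⟩ := ih _ hp (by omega)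
      exact ⟨by rw [l2, hl], p2, fun d => (hcd d).trans (cd2 d), cst2⟩
    · rw [if_neg hfl]
      have heq : ((List.range a.length).foldl pvStepA (a, false)) = (a, false) := by
        rcases hdisj with heq | h2
        · exact heq
        · exact absurd h2.1 hfl
      rw [heq]
      refine ⟨rfl, hpos, fun d => Iff.rfl, ?_⟩
      have hcond := pvFoldA_false (List.range a.length) a (by rw [heq])
      show ∀ x ∈ a, x = a.headI
      apply pvConst_of_le
      intro i hi
      have := hcond i (List.mem_range.mpr hi)
      omega

-- a constant list passes unchanged with the flag down
lemma pvFoldA_const : ∀ (is : List Nat) (a : List Int),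
    (∀ i ∈ is, i < a.length) → (∀ x ∈ a, x = a.headI) →
    is.foldl pvStepA (a, false) = (a, false) := by
  intro is
  induction is with
  | nil => intro a _ _; rfl
  | cons i is ih =>
    intro a hmem hconst
    have hi : i < a.length := hmem i (by simp)
    have hn : 0 < a.length := Nat.lt_of_le_of_lt (Nat.zero_le _) hi
    have hch : ∀ j, j < a.length → a.getD j 0 = a.headI := fun j hj =>
      hconst _ (pvGetD_mem_of_lt a j hj)
    have hstep : pvStepA (a, false) i = (a, false) := by
      simp only [pvStepA]
      rw [hch i hi, hch _ (Nat.mod_lt _ hn), hch _ (Nat.mod_lt _ hn)]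
      rw [if_neg (by omega)]
    simp only [List.foldl_cons, hstep]
    exact ih a (fun j hj => hmem j (by simp [hj])) hconst

-- Euclid: pvGcd divides both arguments
theorem pvGcd_dvd (x y : Int) : pvGcd x y ∣ x ∧ pvGcd x y ∣ y := by
  rw [pvGcd]
  split_ifs with h
  · subst h; exact ⟨dvd_refl x, dvd_zero x⟩
  · obtain ⟨h1, h2⟩ := pvGcd_dvd y (PySem.Int.mod x y)
    refine ⟨?_, h1⟩
    have := PySem.Int.floordiv_mul_add_mod x y
    calc pvGcd y (PySem.Int.mod x y) ∣
        PySem.Int.floordiv x y * y + PySem.Int.mod x y :=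
          dvd_add (Dvd.dvd.mul_left h1 _) h2
      _ = x := this
termination_by y.natAbs
decreasing_by
  rcases lt_trichotomy y 0 with hy | hy | hy
  · have h1 := PySem.Int.mod_neg_bounds x hy
    omega
  · exact absurd hy h
  · have h1 := PySem.Int.mod_nonneg x hy
    have h2 := PySem.Int.mod_lt x hy
    omega

-- Euclid: any common divisor divides pvGcd
theorem pvDvd_gcd (d x y : Int) (hx : d ∣ x) (hy : d ∣ y) : d ∣ pvGcd x y := by
  rw [pvGcd]
  split_ifs with h
  · exact hx
  · apply pvDvd_gcd d y (PySem.Int.mod x y) hy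
    have e := PySem.Int.floordiv_mul_add_mod x y
    have : PySem.Int.mod x y = x - PySem.Int.floordiv x y * y := by omega
    rw [this]
    exact dvd_sub hx (Dvd.dvd.mul_left hy _)
termination_by y.natAbs
decreasing_by
  rcases lt_trichotomy y 0 with hy' | hy' | hy'
  · have h1 := PySem.Int.mod_neg_bounds x hy'
    omega
  · exact absurd hy' h
  · have h1 := PySem.Int.mod_nonneg x hy'
    have h2 := PySem.Int.mod_lt x hy'
    omega

theorem pvGcd_nonneg (x y : Int) (hx : 0 ≤ x) (hy : 0 ≤ y) : 0 ≤ pvGcd x y := by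
  rw [pvGcd]
  split_ifs with h
  · exact hx
  · have hy' : 0 < y := lt_of_le_of_ne hy (Ne.symm h)
    exact pvGcd_nonneg y (PySem.Int.mod x y) hy (PySem.Int.mod_nonneg x hy')
termination_by y.natAbs
decreasing_by
  have h1 := PySem.Int.mod_nonneg x (lt_of_le_of_ne hy (Ne.symm h))
  have h2 := PySem.Int.mod_lt x (lt_of_le_of_ne hy (Ne.symm h))
  omega

lemma pvFoldGcd_dvd : ∀ (a : List Int) (g : Int),
    (a.foldl pvGcd g ∣ g) ∧ ∀ x ∈ a, a.foldl pvGcd g ∣ x := by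
  intro a
  induction a with
  | nil => intro g; exact ⟨dvd_refl g, by simp⟩
  | cons x t ih =>
    intro g
    obtain ⟨h1, h2⟩ := ih (pvGcd g x)
    simp only [List.foldl_cons]
    refine ⟨dvd_trans h1 (pvGcd_dvd g x).1, ?_⟩
    intro y hy
    rcases List.mem_cons.mp hy with rfl | hmem
    · exact dvd_trans h1 (pvGcd_dvd g y).2
    · exact h2 y hmem

lemma pvDvd_foldGcd : ∀ (a : List Int) (g d : Int), d ∣ g → (∀ x ∈ a, d ∣ x) →
    d ∣ a.foldl pvGcd g := by
  intro a
  induction a with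
  | nil => intro g d hg _; exact hg
  | cons x t ih =>
    intro g d hg hx
    simp only [List.foldl_cons]
    exact ih _ d (pvDvd_gcd d g x hg (hx x (by simp))) (fun y hy => hx y (by simp [hy]))

lemma pvFoldGcd_nonneg : ∀ (a : List Int) (g : Int), 0 ≤ g → (∀ x ∈ a, 0 ≤ x) →
    0 ≤ a.foldl pvGcd g := by
  intro a
  induction a with
  | nil => intro g hg _; exact hg
  | cons x t ih =>
    intro g hg hx
    simp only [List.foldl_cons]
    exact ih _ (pvGcd_nonneg g x hg (hx x (by simp))) (fun y hy => hx y (by simp [hy]))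

-- ===== VERDICT (by name: the statement is the Claim_ definition above) =====
theorem find_pairs2_spec : Claim_equal_find_pairs2 := by
  intro a _ hPre
  unfold Spec_find_pairs2 find_pairs2 find_pairs2_alt
  by_cases hc : ∀ x ∈ a, x = a.headI
  · -- constant (or empty / singleton) list: both sides return a unchanged
    have hcondB : ((a.drop 1).all (fun x => x == a.headI)) = true := by
      rw [List.all_eq_true]
      intro x hx
      exact beq_iff_eq.mpr (hc x (List.mem_of_mem_drop hx))
    rw [if_pos hcondB]
    have hfold := pvFoldA_const (List.range a.length) a
      (fun i hi => List.mem_range.mp hi) hc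
    simp only [pvLoopA, pvPassA, hfold]
    simp
  · -- positive, not constant: A converges to the constant gcd list, which B computes
    have hpos : ∀ x ∈ a, 0 < x := by
      rcases hPre with h | h
      · exact h
      · exact absurd h hc
    have hne : a ≠ [] := by rintro rfl; exact hc (by simp)
    have hcondB : ¬ ((a.drop 1).all (fun x => x == a.headI)) = true := by
      intro hall
      apply hc
      intro x hx
      cases a with
      | nil => simp at hx
      | cons b t =>
        rcases List.mem_cons.mp hx with rfl | hxt
        · rfl
        · exact beq_iff_eq.mp (List.all_eq_true.mp hall x (by simpa using hxt))
    rw [if_neg hcondB]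
    obtain ⟨hl, hp, hcd, hcst⟩ := pvLoopA_spec ((a.map Int.toNat).sum + 1) a hpos
      (Nat.lt_succ_self _)
    set r := pvLoopA ((a.map Int.toNat).sum + 1) a with hr
    have hrne : r ≠ [] := by
      intro h0
      exact hne (List.length_eq_zero_iff.mp (by rw [← hl, h0]; rfl))
    have hcr : r.headI ∈ r := by
      rcases List.exists_cons_of_ne_nil hrne with ⟨b, t, hbt⟩
      rw [hbt]
      simp
    have hcpos : 0 < r.headI := hp _ hcr
    have hGdvd : ∀ x ∈ a, a.foldl pvGcd 0 ∣ x := (pvFoldGcd_dvd a 0).2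
    have hGnn : 0 ≤ a.foldl pvGcd 0 :=
      pvFoldGcd_nonneg a 0 le_rfl (fun x hx => le_of_lt (hpos x hx))
    have hGc : a.foldl pvGcd 0 ∣ r.headI := ((hcd _).mp hGdvd) _ hcr
    have hcG : r.headI ∣ a.foldl pvGcd 0 := by
      apply pvDvd_foldGcd a 0 r.headI (dvd_zero _)
      intro x hx
      exact ((hcd r.headI).mpr (fun y hy => by rw [hcst y hy])) x hx
    have hceq : r.headI = a.foldl pvGcd 0 :=
      Int.dvd_antisymm (le_of_lt hcpos) hGnn hcG hGc
    have hrep : r = List.replicate a.length r.headI := by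
      rw [List.eq_replicate_iff]
      exact ⟨hl, fun b hb => hcst b hb⟩
    rw [hrep, hceq]
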